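-- pv_equiv track=rewrite | github.com/bomingzi/UBG | UBG_py/parse_proc_8.py | parse_object_ID
-- ===== SOURCE A (Python) =====
-- def contains_digit(s):
--     return any(char.isdigit() for char in s)
--
-- def parse_object_ID(input_data):
--     split_data = input_data.split("_")
--     parse_ID2folder = ""
--     for i in split_data:
--         if contains_digit(i):
--             break
--         else:
--             parse_ID2folder += i
--             parse_ID2folder += "_"
--     return parse_ID2folder[:-1]
-- ===== SOURCE B (Python) =====
-- def parse_object_ID(input_data):
--     idx = next((i for i, c in enumerate(input_data) if c.isdigit()), None)
--     if idx is None: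
--         return input_data
--     cut = input_data.rfind("_", 0, idx)
--     return "" if cut == -1 else input_data[:cut]
-- ===== Notes on version B (the rewrite author's own statement) =====
-- stated objective: simpler
-- what changed: Instead of splitting on '_' and accumulating digit-free segments in a loop, B locates the first digit character and cuts the string at the last underscore before it via rfind (returning it unchanged when there is no digit).
import Mathlib
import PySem

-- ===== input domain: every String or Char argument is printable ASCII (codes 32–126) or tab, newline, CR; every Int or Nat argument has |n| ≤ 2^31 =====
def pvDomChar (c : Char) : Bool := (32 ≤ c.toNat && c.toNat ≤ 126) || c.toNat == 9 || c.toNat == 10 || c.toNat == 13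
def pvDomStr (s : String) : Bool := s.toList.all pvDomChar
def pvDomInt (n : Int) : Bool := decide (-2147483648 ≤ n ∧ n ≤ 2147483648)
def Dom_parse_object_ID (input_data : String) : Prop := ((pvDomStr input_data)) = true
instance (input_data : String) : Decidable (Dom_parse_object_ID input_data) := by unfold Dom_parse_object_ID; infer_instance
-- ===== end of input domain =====

-- B replaces A's split-on-'_'-and-accumulate loop by finding the first digit character and
-- cutting at the last underscore before it (objective: simpler).

-- ===== PORT A =====
def contains_digit (s : String) : Bool := s.toList.any PySem.Chars.isdigit

def pvLoopA : List String → String → String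
  | [], acc => acc
  | i :: rest, acc =>
    if contains_digit i then acc
    else pvLoopA rest (acc ++ i ++ "_")

def parse_object_ID (input_data : String) : String :=
  let split_data := (PySem.Str.split? input_data "_").getD []
  let parse_ID2folder := pvLoopA split_data ""
  PySem.Str.slice parse_ID2folder none (some (-1))

-- ===== PORT B =====
def parse_object_ID_alt (input_data : String) : String :=
  let idx? := ((PySem.List.enumerate input_data.toList 0).find? (fun p => PySem.Chars.isdigit p.2)).map (·.1)
  match idx? with
  | none => input_data
  | some idx =>
    let cut := PySem.Str.rfindFrom input_data "_" 0 (some idx)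
    if cut = -1 then "" else PySem.Str.slice input_data none (some cut)

-- ===== PRECONDITION & SPEC =====
def Spec_parse_object_ID (input_data : String) (out : String) : Prop := out = parse_object_ID_alt input_data
instance (input_data : String) (out : String) : Decidable (Spec_parse_object_ID input_data out) := by unfold Spec_parse_object_ID; infer_instance

-- ===== CLAIM (what is proved, stated in full; the proofs are below) =====
def Claim_equal_parse_object_ID : Prop := ∀ (input_data : String), Dom_parse_object_ID input_data → Spec_parse_object_ID input_data (parse_object_ID input_data)

-- ===== LEMMAS AND PROOFS =====

-- char-level split on '_' (accumulator `cur` holds the current segment reversed)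
def pvGoS : List Char → List Char → List (List Char)
  | [], cur => [cur.reverse]
  | c :: t, cur => if c = '_' then cur.reverse :: pvGoS t [] else pvGoS t (c :: cur)

-- char-level mirror of A's loop
def pvLoopC : List (List Char) → List Char → List Char
  | [], acc => acc
  | i :: rest, acc =>
    if i.any PySem.Chars.isdigit then acc else pvLoopC rest (acc ++ i ++ ['_'])

def pvFree (s : List Char) : Bool := !(s.any PySem.Chars.isdigit)

-- char-level value of A
def pvA (cs : List Char) : List Char :=
  List.intercalate ['_'] ((pvGoS cs []).takeWhile pvFree)

-- char-level value of B
def pvB (cs : List Char) : List Char :=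
  match ((PySem.List.enumerate cs 0).find? (fun p => PySem.Chars.isdigit p.2)).map (·.1) with
  | none => cs
  | some idx =>
    let cut := PySem.Chars.rfindFrom cs ['_'] 0 (some idx)
    if cut = -1 then [] else PySem.List.slice cs none (some cut)


theorem pvDec (P : Char → Prop) [DecidablePred P] (cs : List Char) :
    (∀ c ∈ cs, P c) ∨ ∃ q c t, cs = q ++ c :: t ∧ (∀ x ∈ q, P x) ∧ ¬P c := by
  induction cs with
  | nil => exact Or.inl (by simp)
  | cons a t ih =>
    by_cases ha : P a
    · rcases ih with h | ⟨q, c, t', rfl, hq, hc⟩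
      · exact Or.inl (by simpa [ha] using h)
      · exact Or.inr ⟨a :: q, c, t', rfl, by simpa [ha] using hq, hc⟩
    · exact Or.inr ⟨[], a, t, rfl, by simp, ha⟩


theorem pvGoS_cons_sep (t : List Char) (cur : List Char) :
    pvGoS ('_' :: t) cur = cur.reverse :: pvGoS t [] := by
  simp [pvGoS]


theorem pvGoS_no_sep (cs : List Char) : ∀ (cur : List Char), '_' ∉ cs → pvGoS cs cur = [cur.reverse ++ cs] := by
  induction cs with
  | nil => simp [pvGoS]
  | cons c t ih =>
    intro cur h
    have hc : c ≠ '_' := fun e => h (e ▸ List.mem_cons_self ..)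
    rw [pvGoS, if_neg hc, ih _ (fun m => h (List.mem_cons_of_mem _ m))]
    simp


theorem pvGoS_append (s : List Char) : ∀ (l cur : List Char), '_' ∉ s →
    pvGoS (s ++ l) cur = pvGoS l (s.reverse ++ cur) := by
  induction s with
  | nil => simp
  | cons c t ih =>
    intro l cur h
    have hc : c ≠ '_' := fun e => h (e ▸ List.mem_cons_self ..)
    rw [List.cons_append, pvGoS, if_neg hc, ih _ _ (fun m => h (List.mem_cons_of_mem _ m))]
    simp


theorem pvGoS_head (r : List Char) : ∀ (cur : List Char),
    ∃ L, pvGoS r cur = (cur.reverse ++ r.takeWhile (· ≠ '_')) :: L := by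
  induction r with
  | nil => intro cur; exact ⟨[], by simp [pvGoS]⟩
  | cons c t ih =>
    intro cur
    by_cases hc : c = '_'
    · subst hc
      exact ⟨pvGoS t [], by simp [pvGoS, List.takeWhile]⟩
    · obtain ⟨L, hL⟩ := ih (c :: cur)
      refine ⟨L, ?_⟩
      rw [pvGoS, if_neg hc, hL]
      simp [hc]


theorem pvGoS_mem (r : List Char) : ∀ (cur : List Char), ∀ seg ∈ pvGoS r cur, ∀ c ∈ seg, c ∈ cur ∨ c ∈ r := by
  induction r with
  | nil =>
    intro cur seg hseg c hc
    simp [pvGoS] at hseg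
    subst hseg
    exact Or.inl (by simpa using hc)
  | cons a t ih =>
    intro cur seg hseg c hc
    by_cases ha : a = '_'
    · subst ha
      rw [pvGoS_cons_sep] at hseg
      rcases List.mem_cons.mp hseg with rfl | hseg
      · exact Or.inl (by simpa using hc)
      · rcases ih [] seg hseg c hc with h | h
        · simp at h
        · exact Or.inr (List.mem_cons_of_mem _ h)
    · rw [pvGoS, if_neg ha] at hseg
      rcases ih (a :: cur) seg hseg c hc with h | h
      · rcases List.mem_cons.mp h with rfl | h
        · exact Or.inr (List.mem_cons_self ..)
        · exact Or.inl h
      · exact Or.inr (List.mem_cons_of_mem _ h)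


theorem pvIntercalate_cons (a : List Char) (L : List (List Char)) (h : L ≠ []) :
    List.intercalate ['_'] (a :: L) = a ++ '_' :: List.intercalate ['_'] L := by
  cases L with
  | nil => exact absurd rfl h
  | cons b M => simp [List.intercalate]


theorem pvGoS_ne (r cur : List Char) : pvGoS r cur ≠ [] := by
  obtain ⟨L, hL⟩ := pvGoS_head r cur
  simp [hL]


theorem pvGoS_intercalate (r : List Char) : ∀ (cur : List Char),
    List.intercalate ['_'] (pvGoS r cur) = cur.reverse ++ r := by
  induction r with
  | nil => intro cur; simp [pvGoS, List.intercalate]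
  | cons a t ih =>
    intro cur
    by_cases ha : a = '_'
    · subst ha
      rw [pvGoS_cons_sep, pvIntercalate_cons _ _ (pvGoS_ne t []), ih []]
      simp
    · rw [pvGoS, if_neg ha, ih (a :: cur)]
      simp


theorem pvPrefix_cons (c : Char) (r : List Char) :
    (['_'] : List Char).isPrefixOf (c :: r) = ('_' == c) := by
  have h1 : (['_'] : List Char).isPrefixOf (c :: r) = ('_' == c && List.isPrefixOf [] r) := rfl
  rw [h1, show List.isPrefixOf ([] : List Char) r = true from rfl, Bool.and_true]


theorem pvPrefix_underscore (l : List Char) : ['_'].isPrefixOf l = true ↔ l.head? = some '_' := by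
  cases l with
  | nil => rw [show (['_'] : List Char).isPrefixOf [] = false from rfl]; simp
  | cons a t =>
    rw [pvPrefix_cons]
    simp only [List.head?_cons, Option.some.injEq, beq_iff_eq]
    exact eq_comm


theorem pvRfindGo_zero (s sub : List Char) :
    PySem.Chars.rfind.go s sub 0 = if sub.isPrefixOf s = true then 0 else -1 := by
  rw [PySem.Chars.rfind.go]


theorem pvRfindGo_succ (s sub : List Char) (j : Nat) :
    PySem.Chars.rfind.go s sub (j + 1) =
      if sub.isPrefixOf (List.drop (j + 1) s) = true then ((j : Int) + 1) else PySem.Chars.rfind.go s sub j := by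
  rw [PySem.Chars.rfind.go]
  split <;> simp


theorem pvRfindGo_none (q : List Char) (h : '_' ∉ q) : ∀ (j : Nat), PySem.Chars.rfind.go q ['_'] j = -1 := by
  intro j
  induction j with
  | zero =>
    rw [pvRfindGo_zero, if_neg]
    intro hp
    have hh := (pvPrefix_underscore q).mp hp
    cases q with
    | nil => simp at hh
    | cons a t =>
      simp at hh
      exact h (hh ▸ List.mem_cons_self ..)
  | succ j ih =>
    rw [pvRfindGo_succ, if_neg, ih]
    intro hp
    have hh := (pvPrefix_underscore _).mp hp
    rw [List.head?_drop] at hh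
    exact h (List.mem_of_getElem? hh)


theorem pvRfind_none (q : List Char) (h : '_' ∉ q) : PySem.Chars.rfind q ['_'] = -1 := by
  rw [PySem.Chars.rfind]; exact pvRfindGo_none q h _


theorem pvRfindGo_ge (q : List Char) : ∀ (j : Nat), -1 ≤ PySem.Chars.rfind.go q ['_'] j := by
  intro j
  induction j with
  | zero => rw [pvRfindGo_zero]; split <;> omega
  | succ j ih =>
    rw [pvRfindGo_succ]
    split
    · omega
    · exact ih


theorem pvRfind_ge (q : List Char) : -1 ≤ PySem.Chars.rfind q ['_'] := by
  rw [PySem.Chars.rfind]; exact pvRfindGo_ge q _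


theorem pvSplitOn_go_eq : ∀ (fuel : Nat) (l cur : List Char) (accs : List (List Char)),
    l.length < fuel →
    PySem.Chars.splitOn.go ['_'] fuel l cur accs = accs.reverse ++ pvGoS l cur := by
  intro fuel
  induction fuel with
  | zero => intro l cur accs h; omega
  | succ f ih =>
    intro l cur accs h
    cases l with
    | nil =>
      rw [PySem.Chars.splitOn.go, pvGoS]
      · simp
      · omega
    | cons c rest =>
      rw [PySem.Chars.splitOn.go]
      by_cases hc : c = '_'
      · subst hc
        rw [if_pos (by rw [pvPrefix_cons]; simp)]
        rw [show List.drop (['_'] : List Char).length ('_' :: rest) = rest by simp]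
        rw [ih _ _ _ (by simpa using Nat.lt_of_succ_lt_succ h), pvGoS, if_pos rfl]
        simp
      · rw [if_neg (by rw [pvPrefix_cons]; simp [Ne.symm hc])]
        rw [ih _ _ _ (by simpa using Nat.lt_of_succ_lt_succ h), pvGoS, if_neg hc]


theorem pvSplitOn_eq (cs : List Char) : PySem.Chars.splitOn cs ['_'] = pvGoS cs [] := by
  rw [PySem.Chars.splitOn, pvSplitOn_go_eq _ _ _ _ (Nat.lt_succ_self _)]
  simp


theorem pvRfindGo_at (s w : List Char) :
    PySem.Chars.rfind.go (s ++ '_' :: w) ['_'] s.length = (s.length : Int) := by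
  cases s with
  | nil =>
    simp only [List.nil_append, List.length_nil]
    rw [pvRfindGo_zero, if_pos (by rw [pvPrefix_cons]; simp)]
    simp
  | cons a t =>
    simp only [List.length_cons]
    rw [pvRfindGo_succ]
    rw [show List.drop (t.length + 1) (a :: t ++ '_' :: w) = '_' :: w from by
      rw [show t.length + 1 = (a :: t).length from by simp]
      exact List.drop_left]
    rw [if_pos (by rw [pvPrefix_cons]; simp)]
    push_cast
    ring


theorem pvFind_none2 (cs : List Char) (h : ∀ c ∈ cs, PySem.Chars.isdigit c = false) : ∀ (s : Int),
    (PySem.List.enumerate cs s).find? (fun p => PySem.Chars.isdigit p.2) = none := by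
  induction cs with
  | nil => intro s; simp [PySem.List.enumerate_nil]
  | cons c t ih =>
    intro s
    rw [PySem.List.enumerate_cons, List.find?_cons_of_neg, ih (fun x hx => h x (List.mem_cons_of_mem _ hx))]
    simp [h c (List.mem_cons_self ..)]


theorem pvFind_first (p : List Char) (c : Char) (t : List Char)
    (hp : ∀ x ∈ p, PySem.Chars.isdigit x = false) (hc : PySem.Chars.isdigit c = true) :
    (PySem.List.enumerate (p ++ c :: t) 0).find? (fun q => PySem.Chars.isdigit q.2) = some ((p.length : Int), c) := by
  rw [PySem.List.enumerate_append, List.find?_append, pvFind_none2 p hp 0,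
      PySem.List.enumerate_cons, Option.none_or, List.find?_cons_of_pos (by simpa using hc)]
  norm_num


theorem pvDrop_shift (s w : List Char) (k : Nat) :
    List.drop (s.length + 1 + k) (s ++ '_' :: w) = List.drop k w := by
  rw [show s.length + 1 + k = s.length + (1 + k) by omega, ← List.drop_drop, List.drop_left,
      show 1 + k = k + 1 by omega, List.drop_succ_cons]


theorem pvRfindGo_shift (s w : List Char) : ∀ (j : Nat),
    PySem.Chars.rfind.go (s ++ '_' :: w) ['_'] (s.length + 1 + j) =
      if PySem.Chars.rfind.go w ['_'] j = -1 then (s.length : Int)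
      else (s.length : Int) + 1 + PySem.Chars.rfind.go w ['_'] j := by
  intro j
  induction j with
  | zero =>
    rw [show s.length + 1 + 0 = s.length + 1 by omega, pvRfindGo_succ]
    rw [show List.drop (s.length + 1) (s ++ '_' :: w) = w by
      have := pvDrop_shift s w 0; simpa using this]
    rw [pvRfindGo_zero w]
    by_cases hw : (['_'] : List Char).isPrefixOf w = true
    · rw [if_pos hw, if_pos hw, if_neg (by omega)]
      push_cast; omega
    · rw [if_neg hw, if_neg hw, if_pos rfl]
      exact pvRfindGo_at s w
  | succ j ih =>
    rw [show s.length + 1 + (j + 1) = (s.length + 1 + j) + 1 by omega, pvRfindGo_succ,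
        show s.length + 1 + j + 1 = s.length + 1 + (j + 1) by omega, pvDrop_shift s w (j + 1),
        pvRfindGo_succ w]
    by_cases hw : (['_'] : List Char).isPrefixOf (List.drop (j + 1) w) = true
    · rw [if_pos hw, if_pos hw, if_neg (by push_cast; omega)]
      push_cast; omega
    · rw [if_neg hw, if_neg hw, ih]


theorem pvRfind_split (s w : List Char) :
    PySem.Chars.rfind (s ++ '_' :: w) ['_'] =
      if PySem.Chars.rfind w ['_'] = -1 then (s.length : Int)
      else (s.length : Int) + 1 + PySem.Chars.rfind w ['_'] := by
  rw [PySem.Chars.rfind, PySem.Chars.rfind,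
      show (s ++ '_' :: w).length = s.length + 1 + w.length by simp; omega]
  exact pvRfindGo_shift s w w.length


theorem pvRfindFrom0 (cs : List Char) (e : Nat) (he : e ≤ cs.length) :
    PySem.Chars.rfindFrom cs ['_'] 0 (some (e : Int)) = PySem.Chars.rfind (cs.take e) ['_'] := by
  have h1 : ¬ ((cs.length : Int) < (e : Int)) := by exact_mod_cast Nat.not_lt.mpr he
  have h2 : ¬ ((e : Int) < 0) := by omega
  rw [PySem.Chars.rfindFrom]
  simp only [h1, if_false, h2, lt_self_iff_false, Int.toNat_natCast, Int.toNat_zero,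
    List.drop_zero, if_neg]
  by_cases hr : PySem.Chars.rfind (List.take e cs) ['_'] = -1
  · rw [if_pos hr, hr]
  · rw [if_neg hr]
    omega


theorem pvRfind_of_mem (q : List Char) (h : '_' ∈ q) : 0 ≤ PySem.Chars.rfind q ['_'] := by
  obtain ⟨q1, q2, rfl⟩ := List.append_of_mem h
  rw [pvRfind_split]
  have := pvRfind_ge q2
  split <;> omega


theorem pvLoopA_toList (segs : List String) : ∀ (acc : String),
    (pvLoopA segs acc).toList = pvLoopC (segs.map String.toList) acc.toList := by
  induction segs with
  | nil => intro acc; simp [pvLoopA, pvLoopC]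
  | cons i rest ih =>
    intro acc
    rw [pvLoopA, List.map_cons, pvLoopC]
    by_cases hd : contains_digit i = true
    · rw [if_pos hd, if_pos (by simpa [contains_digit] using hd)]
    · rw [if_neg hd, if_neg (by simpa [contains_digit] using hd), ih]
      simp


theorem pvLoopC_eq (segs : List (List Char)) : ∀ (acc : List Char),
    pvLoopC segs acc = acc ++ (segs.takeWhile pvFree).flatMap (· ++ ['_']) := by
  induction segs with
  | nil => intro acc; simp [pvLoopC]
  | cons i rest ih =>
    intro acc
    rw [pvLoopC]
    by_cases hd : i.any PySem.Chars.isdigit = true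
    · rw [if_pos hd, List.takeWhile_cons, if_neg (by simp [pvFree, hd])]
      simp
    · rw [if_neg hd, ih, List.takeWhile_cons, if_pos (by simp [pvFree]; simpa using hd)]
      simp




theorem pvTW1 (x : List Char) : ∀ (q : List Char), (∀ a ∈ q, a ≠ '_') →
    (q ++ x).takeWhile (· ≠ '_') = q ++ x.takeWhile (· ≠ '_') := by
  intro q
  induction q with
  | nil => intro _; simp
  | cons a w ih =>
    intro h
    rw [List.cons_append, List.takeWhile_cons, if_pos (by simpa using h a (List.mem_cons_self ..)),
        ih (fun b hb => h b (List.mem_cons_of_mem _ hb)), List.cons_append]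

theorem pvTW2 (x : List Char) : ∀ (q : List Char), '_' ∈ q →
    (q ++ x).takeWhile (· ≠ '_') = q.takeWhile (· ≠ '_') := by
  intro q
  induction q with
  | nil => intro h; simp at h
  | cons a w ih =>
    intro h
    by_cases ha : a = '_'
    · subst ha
      rw [List.cons_append, List.takeWhile_cons, List.takeWhile_cons]
      simp
    · have hw : '_' ∈ w := by
        cases List.mem_cons.mp h with
        | inl h1 => exact absurd h1.symm ha
        | inr h1 => exact h1
      rw [List.cons_append, List.takeWhile_cons, List.takeWhile_cons, ih hw]

theorem pvTWall (p : List Char → Bool) : ∀ (L : List (List Char)), (∀ x ∈ L, p x = true) →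
    L.takeWhile p = L := by
  intro L
  induction L with
  | nil => intro _; rfl
  | cons a M ih =>
    intro h
    rw [List.takeWhile_cons, if_pos (h a (List.mem_cons_self ..)),
        ih (fun x hx => h x (List.mem_cons_of_mem _ hx))]

theorem pvFlatMap_dropLast (L : List (List Char)) :
    (L.flatMap (· ++ ['_'])).dropLast = List.intercalate ['_'] L := by
  induction L with
  | nil => simp [List.intercalate]
  | cons a M ih =>
    cases M with
    | nil => simp [List.intercalate]
    | cons b M' =>
      rw [List.flatMap_cons,
          List.dropLast_append_of_ne_nil (show List.flatMap (fun x => x ++ ['_']) (b :: M') ≠ [] by simp),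
          ih, pvIntercalate_cons a (b :: M') (by simp)]
      simp

theorem pvA_char (input : String) : (parse_object_ID input).toList = pvA input.toList := by
  obtain ⟨l, hl, hmap⟩ : ∃ l, PySem.Str.split? input "_" = some l ∧
      l.map String.toList = PySem.Chars.splitOn input.toList ['_'] := by
    have h := PySem.Str.split?_map input "_"
    rw [show ("_" : String).toList = ['_'] from rfl, PySem.Chars.split?] at h
    rw [if_neg (by simp)] at h
    rcases Option.map_eq_some_iff.mp h with ⟨l, hl, hm⟩
    exact ⟨l, hl, hm⟩
  rw [parse_object_ID]
  simp only [hl, Option.getD_some]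
  rw [PySem.Str.slice_to_neg_one, pvLoopA_toList, pvLoopC_eq, hmap, pvSplitOn_eq]
  rw [show ("" : String).toList = [] from rfl, List.nil_append, pvFlatMap_dropLast, pvA]

theorem pvB_char (input : String) : (parse_object_ID_alt input).toList = pvB input.toList := by
  rw [parse_object_ID_alt, pvB]
  cases h : ((PySem.List.enumerate input.toList 0).find? (fun p => PySem.Chars.isdigit p.2)).map (·.1) with
  | none => rfl
  | some idx =>
    have hcut : PySem.Str.rfindFrom input "_" 0 (some idx) =
        PySem.Chars.rfindFrom input.toList ['_'] 0 (some idx) := by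
      rw [PySem.Str.rfindFrom_eq, show ("_" : String).toList = ['_'] from rfl]
    by_cases hc : PySem.Chars.rfindFrom input.toList ['_'] 0 (some idx) = -1
    · simp [hcut, hc]
    · simp [hcut, hc, PySem.Str.toList_slice, PySem.Chars.slice_eq_listSlice]

theorem pvB_headDigit (q : List Char) (c : Char) (r : List Char)
    (hu : '_' ∉ q) (hq : ∀ x ∈ q, PySem.Chars.isdigit x = false) (hc : PySem.Chars.isdigit c = true) :
    pvB (q ++ c :: r) = [] := by
  have hfind := pvFind_first q c r hq hc
  have hlen : q.length ≤ (q ++ c :: r).length := by simp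
  simp only [pvB, hfind, Option.map_some]
  rw [pvRfindFrom0 _ _ hlen, List.take_left, pvRfind_none q hu, if_pos rfl]

theorem pvMainAux : ∀ (n : Nat) (cs : List Char), cs.length ≤ n → pvB cs = pvA cs := by
  intro n
  induction n with
  | zero =>
    intro cs hlen
    have : cs = [] := List.length_eq_zero_iff.mp (Nat.le_zero.mp hlen)
    subst this
    rfl
  | succ n ih =>
    intro cs hlen
    rcases pvDec (fun c => c ≠ '_') cs with hno | ⟨s, u, t, rfl, hs, hu⟩
    · -- no underscore in cs
      have hnu : '_' ∉ cs := fun hm => (hno _ hm) rfl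
      rcases pvDec (fun c => PySem.Chars.isdigit c = false) cs with hnd | ⟨q, c, r, rfl, hq, hc⟩
      · -- no digit either
        have hfind := pvFind_none2 cs (fun x hx => hnd x hx) 0
        have hfree : pvFree cs = true := by
          rw [pvFree]
          simp only [Bool.not_eq_true', List.any_eq_false]
          intro x hx
          simp [hnd x hx]
        have hB : pvB cs = cs := by simp [pvB, hfind]
        rw [hB, pvA, pvGoS_no_sep cs [] hnu]
        simp [List.takeWhile_cons, hfree, List.intercalate]
      · -- first digit c, digit-free prefix q
        have hc' : PySem.Chars.isdigit c = true := by simpa using hc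
        have hB := pvB_headDigit q c r (fun hm => hnu (List.mem_append.mpr (Or.inl hm)))
          (fun x hx => hq x hx) hc'
        have hfree : pvFree (q ++ c :: r) = false := by
          rw [pvFree]
          simp only [Bool.not_eq_false', List.any_eq_true]
          exact ⟨c, by simp, hc'⟩
        rw [hB, pvA, pvGoS_no_sep _ [] hnu]
        simp [List.takeWhile_cons, hfree, List.intercalate]
    · -- cs = s ++ u :: t with u = '_'
      have hu' : u = '_' := by simpa using hu
      subst hu'
      have hnus : '_' ∉ s := fun hm => (hs _ hm) rfl
      have hGoS : pvGoS (s ++ '_' :: t) [] = s :: pvGoS t [] := by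
        rw [pvGoS_append s ('_' :: t) [] hnus, pvGoS_cons_sep]
        simp
      rcases pvDec (fun c => PySem.Chars.isdigit c = false) s with hsd | ⟨q, c, r0, hseq, hq, hc⟩
      · -- s digit-free
        have hsfree : pvFree s = true := by
          rw [pvFree]
          simp only [Bool.not_eq_true', List.any_eq_false]
          intro x hx
          simp [hsd x hx]
        rcases pvDec (fun c => PySem.Chars.isdigit c = false) t with htd | ⟨q, c, r, hteq, hq, hc⟩
        · -- no digit at all
          have hfind := pvFind_none2 (s ++ '_' :: t) (by
            intro x hx
            rcases List.mem_append.mp hx with h1 | h2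
            · exact hsd x h1
            · rcases List.mem_cons.mp h2 with rfl | h3
              · decide
              · exact htd x h3) 0
          have hB : pvB (s ++ '_' :: t) = s ++ '_' :: t := by simp [pvB, hfind]
          have hTW : (pvGoS t []).takeWhile pvFree = pvGoS t [] := by
            apply pvTWall
            intro seg hseg
            rw [pvFree]
            simp only [Bool.not_eq_true', List.any_eq_false]
            intro x hx
            rcases pvGoS_mem t [] seg hseg x hx with h1 | h1
            · simp at h1
            · simp [htd x h1]
          have hint : List.intercalate ['_'] (pvGoS t []) = t := by
            have := pvGoS_intercalate t []
            simpa using this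
          rw [hB, pvA, hGoS, List.takeWhile_cons, if_pos hsfree, hTW,
              pvIntercalate_cons s _ (pvGoS_ne t []), hint]
        · -- t has its first digit c after digit-free q
          have hc' : PySem.Chars.isdigit c = true := by simpa using hc
          subst hteq
          have hpre : ∀ x ∈ s ++ '_' :: q, PySem.Chars.isdigit x = false := by
            intro x hx
            rcases List.mem_append.mp hx with h1 | h2
            · exact hsd x h1
            · rcases List.mem_cons.mp h2 with rfl | h3
              · decide
              · exact hq x h3
          have hcs : s ++ '_' :: (q ++ c :: r) = (s ++ '_' :: q) ++ c :: r := by simp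
          have hfind : (PySem.List.enumerate (s ++ '_' :: (q ++ c :: r)) 0).find?
              (fun p => PySem.Chars.isdigit p.2) = some (((s ++ '_' :: q).length : Int), c) := by
            rw [hcs]
            exact pvFind_first _ c r hpre hc'
          have hcutcs : PySem.Chars.rfindFrom (s ++ '_' :: (q ++ c :: r)) ['_'] 0
                (some ((s ++ '_' :: q).length : Int)) =
              if PySem.Chars.rfind q ['_'] = -1 then (s.length : Int)
              else (s.length : Int) + 1 + PySem.Chars.rfind q ['_'] := by
            rw [pvRfindFrom0 _ _ (by simp), hcs, List.take_left, pvRfind_split]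
          have hfindt : (PySem.List.enumerate (q ++ c :: r) 0).find?
              (fun p => PySem.Chars.isdigit p.2) = some ((q.length : Int), c) :=
            pvFind_first q c r hq hc'
          have hcutt : PySem.Chars.rfindFrom (q ++ c :: r) ['_'] 0 (some (q.length : Int)) =
              PySem.Chars.rfind q ['_'] := by
            rw [pvRfindFrom0 _ _ (by simp), List.take_left]
          have hiht : pvB (q ++ c :: r) = pvA (q ++ c :: r) := by
            apply ih
            simp at hlen ⊢
            omega
          obtain ⟨L0, hL0⟩ := pvGoS_head (q ++ c :: r) []
          have hL0' : pvGoS (q ++ c :: r) [] = (List.takeWhile (· ≠ '_') (q ++ c :: r)) :: L0 := by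
            simpa using hL0
          by_cases hm : '_' ∈ q
          · have h0 : 0 ≤ PySem.Chars.rfind q ['_'] := pvRfind_of_mem q hm
            have hB : pvB (s ++ '_' :: (q ++ c :: r)) =
                List.take (s.length + 1 + (PySem.Chars.rfind q ['_']).toNat) (s ++ '_' :: (q ++ c :: r)) := by
              simp only [pvB, hfind, Option.map_some]
              rw [hcutcs, if_neg (by omega), if_neg (by omega), PySem.List.slice_to _ (by omega)]
              congr 1
              omega
            have hBt : pvB (q ++ c :: r) =
                List.take (PySem.Chars.rfind q ['_']).toNat (q ++ c :: r) := by
              simp only [pvB, hfindt, Option.map_some]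
              rw [hcutt, if_neg (by omega), PySem.List.slice_to _ h0]
            have htake : List.take (s.length + 1 + (PySem.Chars.rfind q ['_']).toNat)
                (s ++ '_' :: (q ++ c :: r)) =
                s ++ '_' :: List.take (PySem.Chars.rfind q ['_']).toNat (q ++ c :: r) := by
              rw [List.take_append, List.take_of_length_le (by omega),
                  show s.length + 1 + (PySem.Chars.rfind q ['_']).toNat - s.length
                    = (PySem.Chars.rfind q ['_']).toNat + 1 by omega, List.take_succ_cons]
            have hhead : List.takeWhile (· ≠ '_') (q ++ c :: r) = List.takeWhile (· ≠ '_') q :=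
              pvTW2 _ q hm
            have hheadfree : pvFree (List.takeWhile (· ≠ '_') (q ++ c :: r)) = true := by
              rw [hhead, pvFree]
              simp only [Bool.not_eq_true', List.any_eq_false]
              intro x hx
              simp [hq x ((List.takeWhile_sublist _).subset hx)]
            have hAcs : pvA (s ++ '_' :: (q ++ c :: r)) = s ++ '_' :: pvA (q ++ c :: r) := by
              conv_lhs => rw [pvA, hGoS, List.takeWhile_cons, if_pos hsfree]
              conv_rhs => rw [pvA]
              rw [hL0', List.takeWhile_cons, if_pos hheadfree,
                  pvIntercalate_cons _ _ (by simp)]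
            rw [hB, htake, hAcs, ← hiht, hBt]
          · have hqn : PySem.Chars.rfind q ['_'] = -1 := pvRfind_none q hm
            have hB : pvB (s ++ '_' :: (q ++ c :: r)) = s := by
              simp only [pvB, hfind, Option.map_some]
              rw [hcutcs, if_pos hqn, if_neg (by omega), PySem.List.slice_to _ (by omega)]
              rw [show ((s.length : Int)).toNat = s.length by omega]
              rw [show s ++ '_' :: (q ++ c :: r) = s ++ ('_' :: (q ++ c :: r)) from rfl, List.take_left]
            have hcne : c ≠ '_' := by
              intro e
              rw [e] at hc'
              exact absurd hc' (by decide)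
            have hhead : List.takeWhile (· ≠ '_') (q ++ c :: r) =
                q ++ c :: List.takeWhile (· ≠ '_') r := by
              rw [pvTW1 _ q (fun a ha e => hm (e ▸ ha)), List.takeWhile_cons, if_pos (by simpa using hcne)]
            have hheadfree : pvFree (List.takeWhile (· ≠ '_') (q ++ c :: r)) = false := by
              rw [hhead, pvFree]
              simp only [Bool.not_eq_false', List.any_eq_true]
              exact ⟨c, by simp, hc'⟩
            have hAcs : pvA (s ++ '_' :: (q ++ c :: r)) = s := by
              rw [pvA, hGoS, List.takeWhile_cons, if_pos hsfree, hL0', List.takeWhile_cons,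
                  if_neg (by rw [hheadfree]; simp)]
              simp [List.intercalate]
            rw [hB, hAcs]
      · -- s contains a digit
        have hc' : PySem.Chars.isdigit c = true := by simpa using hc
        subst hseq
        have hcs : (q ++ c :: r0) ++ '_' :: t = q ++ c :: (r0 ++ '_' :: t) := by simp
        have hB : pvB ((q ++ c :: r0) ++ '_' :: t) = [] := by
          rw [hcs]
          exact pvB_headDigit q c _ (fun hm => hnus (List.mem_append.mpr (Or.inl hm)))
            (fun x hx => hq x hx) hc'
        have hfree : pvFree (q ++ c :: r0) = false := by
          rw [pvFree]
          simp only [Bool.not_eq_false', List.any_eq_true]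
          exact ⟨c, by simp, hc'⟩
        rw [hB, pvA, hGoS]
        simp [List.takeWhile_cons, hfree, List.intercalate]

theorem pvMain (cs : List Char) : pvB cs = pvA cs := pvMainAux cs.length cs le_rfl

theorem parse_object_ID_spec : Claim_equal_parse_object_ID := by
  intro input _
  unfold Spec_parse_object_ID
  apply String.toList_injective
  rw [pvA_char, pvB_char, pvMain]
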